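-- pv_equiv track=rewrite | github.com/JngMkk/Algorithm | Algorithm/String/reordering_log_file.py | reorder_with_lambda
-- ===== SOURCE A (Python) =====
-- def func(x: str) -> tuple[list[str], str]:
--     splited = x.split()
--     return splited[1:], splited[0]
--
-- def reorder_with_lambda(logs: list[str]) -> list[str]:
--     letters: list[str] = []
--     digits: list[str] = []
--
--     for log in logs:
--         if log.split()[1].isdigit():
--             digits.append(log)
--         else:
--             letters.append(log)
--
--     # * 식별자를 제외한 문자열을 키로 정렬, 후순위로 식별자
--     letters.sort(key=func)
--     return letters + digits
-- ===== SOURCE B (Python) =====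
-- def reorder_with_lambda(logs: list[str]) -> list[str]:
--     def key(log: str):
--         splited = log.split()
--         if splited[1].isdigit():
--             return (1, [], "")
--         return (0, splited[1:], splited[0])
--     return sorted(logs, key=key)
-- ===== Notes on version B (the rewrite author's own statement) =====
-- stated objective: idiomatic
-- what changed: Replaces the partition loop + in-place sort of the letter sublist + concatenation with one stable sorted() call over the whole list using a compound key (group 1 for digit logs so stability keeps their order, group 0 with (content, identifier) for letter logs).
import Mathlib
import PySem

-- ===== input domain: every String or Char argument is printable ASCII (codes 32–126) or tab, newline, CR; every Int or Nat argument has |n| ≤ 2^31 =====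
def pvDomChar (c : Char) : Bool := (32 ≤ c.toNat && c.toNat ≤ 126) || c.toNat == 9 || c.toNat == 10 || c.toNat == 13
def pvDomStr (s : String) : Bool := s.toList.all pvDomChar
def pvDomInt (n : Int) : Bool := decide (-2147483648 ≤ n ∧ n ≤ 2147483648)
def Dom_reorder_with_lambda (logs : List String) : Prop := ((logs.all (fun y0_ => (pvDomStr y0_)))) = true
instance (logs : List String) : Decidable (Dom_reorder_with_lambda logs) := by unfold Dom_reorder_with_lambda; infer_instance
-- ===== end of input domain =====

-- B reorders the log file with a single stable sorted() call over a compound key instead of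
-- A's partition loop + in-place sort of the letter sublist + concatenation (objective: idiomatic).

-- ===== PORT A =====

-- log.split()[1].isdigit(); the [1] indexing raises outside Pre_, where nothing is claimed (getD "")
def pvADig (log : String) : Bool :=
  PySem.Str.strIsdigit ((PySem.List.pyGet? (PySem.Str.split₀ log) 1).getD "")

-- func(x) = (splited[1:], splited[0]) : a Python pair (list of words, word), used only as a sort key.
-- Encoded as the single list splited[1:] ++ ["", splited[0]]: lexicographic comparison of these lists
-- is EXACTLY Python's comparison of the pairs, because every word produced by split() is nonempty
-- (so "" is strictly below any word, making a proper prefix of the word list compare smaller).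
def pvAKey (x : String) : List String :=
  (PySem.Str.split₀ x).drop 1 ++ ["", (PySem.List.pyGet? (PySem.Str.split₀ x) 0).getD ""]

def reorder_with_lambda (logs : List String) : List String :=
  -- letters, digits accumulated by the for-loop (Python list.append)
  let p := logs.foldl
    (fun (acc : List String × List String) log =>
      if pvADig log then (acc.1, acc.2 ++ [log]) else (acc.1 ++ [log], acc.2))
    ([], [])
  -- letters.sort(key=func); return letters + digits
  PySem.List.sorted p.1 pvAKey ++ p.2

-- ===== PORT B =====

-- splited[1].isdigit() inside B's key function
def pvBDig (log : String) : Bool :=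
  PySem.Str.strIsdigit ((PySem.List.pyGet? (PySem.Str.split₀ log) 1).getD "")

-- B's compound key (1, [], "") / (0, splited[1:], splited[0]): first component below, the remaining
-- pair encoded as one list exactly as in pvAKey (exact for Python's tuple/list comparison since
-- split() words are nonempty); digit logs all get the equal key ["", ""], so the stable sort keeps them in order.
def pvBKey2 (log : String) : List String :=
  if pvBDig log then ["", ""]
  else (PySem.Str.split₀ log).drop 1 ++ ["", (PySem.List.pyGet? (PySem.Str.split₀ log) 0).getD ""]

def reorder_with_lambda_alt (logs : List String) : List String :=
  PySem.List.sorted2 logs (fun log => if pvBDig log then (1 : Int) else 0) pvBKey2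

-- ===== PRECONDITION & SPEC =====
-- Pre_ excludes exactly the inputs on which the Python A raises IndexError: a log whose
-- whitespace-split has fewer than two words makes log.split()[1] raise.
def Pre_reorder_with_lambda (logs : List String) : Prop :=
  ∀ log ∈ logs, 2 ≤ (PySem.Str.split₀ log).length
instance (logs : List String) : Decidable (Pre_reorder_with_lambda logs) := by
  unfold Pre_reorder_with_lambda; infer_instance

def pvWitness_reorder_with_lambda : List String :=
  ["dig1 8 1 5 1", "let1 art can", "let2 own kit dig", "dig2 3 6", "let3 art zero"]

def Spec_reorder_with_lambda (logs : List String) (out : List String) : Prop := out = reorder_with_lambda_alt logs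
instance (logs : List String) (out : List String) : Decidable (Spec_reorder_with_lambda logs out) := by unfold Spec_reorder_with_lambda; infer_instance

-- ===== CLAIM (what is proved, stated in full; the proofs are below) =====
def Claim_equal_reorder_with_lambda : Prop := ∀ (logs : List String), Dom_reorder_with_lambda logs → Pre_reorder_with_lambda logs → Spec_reorder_with_lambda logs (reorder_with_lambda logs)

-- ===== LEMMAS AND PROOFS =====

-- B's comparison function, as sorted2 builds it
def pvLtB (a b : String) : Bool :=
  decide ((if pvBDig a then (1 : Int) else 0) < (if pvBDig b then (1 : Int) else 0)) ||
  (!decide ((if pvBDig b then (1 : Int) else 0) < (if pvBDig a then (1 : Int) else 0)) &&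
    decide (pvBKey2 a < pvBKey2 b))

-- A's comparison function on letters
def pvLtA (a b : String) : Bool := decide (pvAKey a < pvAKey b)

theorem pvDig_eq (log : String) : pvBDig log = pvADig log := rfl

theorem pvLtB_letters (a b : String) (ha : pvADig a = false) (hb : pvADig b = false) :
    pvLtB a b = pvLtA a b := by
  simp [pvLtB, pvLtA, pvBKey2, pvAKey, pvDig_eq, ha, hb]

theorem pvLtB_letter_digit (a b : String) (ha : pvADig a = false) (hb : pvADig b = true) :
    pvLtB a b = true := by
  simp [pvLtB, pvDig_eq, ha, hb]

theorem pvLtB_digit_any (a b : String) (ha : pvADig a = true) :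
    pvLtB a b = false := by
  by_cases hb : pvADig b = true
  · simp [pvLtB, pvBKey2, pvDig_eq, ha, hb]
  · simp at hb
    simp [pvLtB, pvDig_eq, ha, hb]

-- inserting x into L ++ D, where x compares as ltA within L and strictly before everything in D
theorem insertBy_split (lt2 ltA : String → String → Bool) (x : String) (L D : List String)
    (hL : ∀ y ∈ L, lt2 x y = ltA x y) (hD : ∀ d ∈ D, lt2 x d = true) :
    PySem.List.insertBy lt2 x (L ++ D) = PySem.List.insertBy ltA x L ++ D := by
  induction L with
  | nil =>
    cases D with
    | nil => rfl
    | cons d D => simp [PySem.List.insertBy, hD d (by simp)]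
  | cons y L ih =>
    have hy := hL y (by simp)
    simp only [List.cons_append, PySem.List.insertBy, hy]
    by_cases h : ltA x y = true
    · simp [h]
    · simp only [Bool.not_eq_true] at h
      simp [h, ih (fun z hz => hL z (by simp [hz]))]

-- the main loop invariant: B's insertion-sort fold over L ++ D is A's fold over the letters,
-- with the digits appended in encounter order
theorem pv_inv (xs : List String) (L D : List String)
    (hL : ∀ y ∈ L, pvADig y = false) (hD : ∀ y ∈ D, pvADig y = true) :
    xs.foldl (fun acc x => PySem.List.insertBy pvLtB x acc) (L ++ D) =
      (xs.filter (fun x => !pvADig x)).foldl (fun acc x => PySem.List.insertBy pvLtA x acc) L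
        ++ (D ++ xs.filter (fun x => pvADig x)) := by
  induction xs generalizing L D with
  | nil => simp
  | cons x xs ih =>
    by_cases hx : pvADig x = true
    · have hstep : PySem.List.insertBy pvLtB x (L ++ D) = L ++ (D ++ [x]) := by
        rw [PySem.List.insertBy_of_forall_not_before pvLtB x (L ++ D)
          (fun y _ => pvLtB_digit_any x y hx), List.append_assoc]
      simp only [List.foldl_cons, hstep]
      rw [ih L (D ++ [x]) hL (by
        intro y hy
        rcases List.mem_append.mp hy with h | h
        · exact hD y h
        · simp at h; simpa [h] using hx)]
      simp [hx]
    · simp only [Bool.not_eq_true] at hx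
      have hstep : PySem.List.insertBy pvLtB x (L ++ D) = PySem.List.insertBy pvLtA x L ++ D :=
        insertBy_split pvLtB pvLtA x L D
          (fun y hy => pvLtB_letters x y hx (hL y hy))
          (fun d hd => pvLtB_letter_digit x d hx (hD d hd))
      simp only [List.foldl_cons, hstep]
      rw [ih (PySem.List.insertBy pvLtA x L) D (by
        intro y hy
        rcases (PySem.List.mem_insertBy pvLtA x y L).mp hy with h | h
        · simpa [h] using hx
        · exact hL y h) hD]
      simp [hx]

-- A's partition fold is the two filters
theorem pv_partition (xs : List String) (a b : List String) :
    xs.foldl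
      (fun (acc : List String × List String) log =>
        if pvADig log then (acc.1, acc.2 ++ [log]) else (acc.1 ++ [log], acc.2))
      (a, b) =
    (a ++ xs.filter (fun x => !pvADig x), b ++ xs.filter (fun x => pvADig x)) := by
  induction xs generalizing a b with
  | nil => simp
  | cons x xs ih =>
    by_cases hx : pvADig x = true
    · simp [hx, ih]
    · simp only [Bool.not_eq_true] at hx
      simp [hx, ih]

-- ===== VERDICT (by name: the statement is the Claim_ definition above) =====
theorem reorder_with_lambda_spec : Claim_equal_reorder_with_lambda := by
  intro logs _ _
  unfold Spec_reorder_with_lambda reorder_with_lambda reorder_with_lambda_alt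
  rw [pv_partition]
  show PySem.List.sorted (logs.filter (fun x => !pvADig x)) pvAKey ++ logs.filter (fun x => pvADig x)
      = PySem.List.sorted2 logs (fun log => if pvBDig log then (1 : Int) else 0) pvBKey2
  rw [PySem.List.sorted_eq_foldl_insertBy]
  have h2 : PySem.List.sorted2 logs (fun log => if pvBDig log then (1 : Int) else 0) pvBKey2 =
      logs.foldl (fun acc x => PySem.List.insertBy pvLtB x acc) [] := rfl
  rw [h2]
  have := pv_inv logs [] [] (by simp) (by simp)
  simp only [List.append_nil, List.nil_append] at this
  rw [this]
  rfl
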